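-- pv_equiv track=rewrite | github.com/kishwordulal1234/drip | proxy_validtor.py | parse_proxy
-- ===== SOURCE A (Python) =====
-- def parse_proxy(line: str):
--     """Return (proxy_url_http, proxy_url_https, original_line) or None."""
--     line = line.strip()
--     if not line or line.startswith("#"):
--         return None
--
--     parts = line.split(":")
--     try:
--         if len(parts) == 2:
--             # ip:port
--             ip, port = parts[0].strip(), parts[1].strip()
--             proxy = f"http://{ip}:{port}"
--             return {"http": proxy, "https": proxy}, line
--
--         elif len(parts) == 4:
--             # ip:port:user:pass
--             ip, port, user, passwd = [p.strip() for p in parts]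
--             proxy = f"http://{user}:{passwd}@{ip}:{port}"
--             return {"http": proxy, "https": proxy}, line
--
--         else:
--             return None
--     except Exception:
--         return None
-- ===== SOURCE B (Python) =====
-- def parse_proxy(line: str):
--     """Sequential colon search with slicing instead of split-and-branch-on-length."""
--     line = line.strip()
--     if not line or line.startswith("#"):
--         return None
--     i = line.find(":")
--     if i < 0:
--         return None
--     j = line.find(":", i + 1)
--     if j < 0:
--         proxy = f"http://{line[:i].strip()}:{line[i+1:].strip()}"
--     else:
--         k = line.find(":", j + 1)
--         if k < 0 or line.find(":", k + 1) >= 0: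
--             return None
--         proxy = (f"http://{line[j+1:k].strip()}:{line[k+1:].strip()}"
--                  f"@{line[:i].strip()}:{line[i+1:j].strip()}")
--     return {"http": proxy, "https": proxy}, line
-- ===== Notes on version B (the rewrite author's own statement) =====
-- stated objective: alternative
-- what changed: B replaces A's split-into-a-list-then-branch-on-length with sequential str.find of the colon positions and direct slicing of the line, so no intermediate list of parts is built.
import Mathlib
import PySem

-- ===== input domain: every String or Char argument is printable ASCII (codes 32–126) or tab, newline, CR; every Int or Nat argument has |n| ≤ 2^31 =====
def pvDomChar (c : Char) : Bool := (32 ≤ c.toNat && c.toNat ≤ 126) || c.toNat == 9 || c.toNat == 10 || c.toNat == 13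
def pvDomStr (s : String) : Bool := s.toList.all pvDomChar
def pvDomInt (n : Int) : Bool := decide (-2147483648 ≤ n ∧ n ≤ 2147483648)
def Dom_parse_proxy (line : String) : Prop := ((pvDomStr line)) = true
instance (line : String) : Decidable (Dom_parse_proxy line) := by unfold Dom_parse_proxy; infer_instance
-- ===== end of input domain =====

-- B replaces A's split-into-a-list-and-branch-on-length with sequential find of the
-- colon positions plus slicing; objective: alternative (same cost, different algorithm).

-- ===== PORT A =====
def parse_proxy (line : String) : Option ((List (String × String)) × String) :=
  let line := PySem.Str.strip line
  if line = "" || PySem.Str.startswith line "#" then none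
  else
    -- parts = line.split(":"); sep ":" is non-empty so split? is always `some`
    let parts := (PySem.Str.split? line ":").getD []
    if parts.length = 2 then
      -- indices 0 and 1 are in range because parts.length = 2
      let ip := PySem.Str.strip (parts.getD 0 "")
      let port := PySem.Str.strip (parts.getD 1 "")
      let proxy := "http://" ++ ip ++ ":" ++ port
      some ([("http", proxy), ("https", proxy)], line)
    else if parts.length = 4 then
      -- [p.strip() for p in parts], then unpack (indices in range: length = 4)
      let stripped := parts.map PySem.Str.strip
      let ip := stripped.getD 0 ""
      let port := stripped.getD 1 ""
      let user := stripped.getD 2 ""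
      let passwd := stripped.getD 3 ""
      let proxy := "http://" ++ user ++ ":" ++ passwd ++ "@" ++ ip ++ ":" ++ port
      some ([("http", proxy), ("https", proxy)], line)
    else none

-- ===== PORT B =====
def parse_proxy_alt (line : String) : Option ((List (String × String)) × String) :=
  let line := PySem.Str.strip line
  if line = "" || PySem.Str.startswith line "#" then none
  else
    let i := PySem.Str.find line ":"
    if i < 0 then none
    else
      let j := PySem.Str.findFrom line ":" (i + 1)
      if j < 0 then
        let proxy := "http://" ++ PySem.Str.strip (PySem.Str.slice line none (some i))
          ++ ":" ++ PySem.Str.strip (PySem.Str.slice line (some (i + 1)) none)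
        some ([("http", proxy), ("https", proxy)], line)
      else
        let k := PySem.Str.findFrom line ":" (j + 1)
        if k < 0 || 0 ≤ PySem.Str.findFrom line ":" (k + 1) then none
        else
          let proxy := "http://" ++ PySem.Str.strip (PySem.Str.slice line (some (j + 1)) (some k))
            ++ ":" ++ PySem.Str.strip (PySem.Str.slice line (some (k + 1)) none)
            ++ "@" ++ PySem.Str.strip (PySem.Str.slice line none (some i))
            ++ ":" ++ PySem.Str.strip (PySem.Str.slice line (some (i + 1)) (some j))
          some ([("http", proxy), ("https", proxy)], line)

-- ===== PRECONDITION & SPEC =====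
def Spec_parse_proxy (line : String) (out : Option ((List (String × String)) × String)) : Prop := out = parse_proxy_alt line
instance (line : String) (out : Option ((List (String × String)) × String)) : Decidable (Spec_parse_proxy line out) := by unfold Spec_parse_proxy; infer_instance

-- ===== CLAIM (what is proved, stated in full; the proofs are below) =====
def Claim_equal_parse_proxy : Prop := ∀ (line : String), Dom_parse_proxy line → Spec_parse_proxy line (parse_proxy line)

-- ===== LEMMAS AND PROOFS =====

-- proof-side characterisation of str.split(":"): structural recursion on the chars
def spl : List Char → List (List Char)
  | [] => [[]]
  | c :: t => if c = ':' then [] :: spl t else (spl t).modifyHead (c :: ·)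

theorem spl_ne_nil (cs : List Char) : spl cs ≠ [] := by
  induction cs with
  | nil => simp [spl]
  | cons c t ih =>
    simp only [spl]
    split
    · simp
    · cases h : spl t with
      | nil => exact absurd h ih
      | cons a l => simp [List.modifyHead]

theorem splitOn_go_eq (fuel : Nat) : ∀ (l cur : List Char) (accs : List (List Char)),
    l.length ≤ fuel →
    PySem.Chars.splitOn.go [':'] fuel l cur accs = accs.reverse ++ (spl l).modifyHead (cur.reverse ++ ·) := by
  induction fuel with
  | zero =>
    intro l cur accs hl
    have : l = [] := List.eq_nil_of_length_eq_zero (Nat.le_zero.mp hl)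
    subst this
    simp [PySem.Chars.splitOn.go, spl]
  | succ n ih =>
    intro l cur accs hl
    cases l with
    | nil => simp [PySem.Chars.splitOn.go, spl]
    | cons c t =>
      by_cases hc : c = ':'
      · subst hc
        have hpre : List.isPrefixOf [':'] (':' :: t) = true := by simp [List.isPrefixOf]
        conv_lhs => rw [PySem.Chars.splitOn.go.eq_def]
        simp only [hpre, if_pos, List.length_cons, List.length_nil, List.drop_succ_cons, List.drop_zero]
        rw [ih t [] (cur.reverse :: accs) (by simpa using Nat.lt_succ_iff.mp (by simpa using hl))]
        simp [spl]
        cases hsplt : spl t <;> simp [List.modifyHead]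
      · have hpre : List.isPrefixOf [':'] (c :: t) = false := by
          simp [List.isPrefixOf]; exact fun h => (hc (Eq.symm h)).elim
        conv_lhs => rw [PySem.Chars.splitOn.go.eq_def]
        simp only [hpre, Bool.false_eq_true, if_false]
        rw [ih t (c :: cur) accs (by simpa using Nat.lt_succ_iff.mp (by simpa using hl))]
        have hnil := spl_ne_nil t
        cases h : spl t with
        | nil => exact absurd h hnil
        | cons a l => simp [spl, hc, h, List.modifyHead]

theorem splitOn_eq_spl (cs : List Char) : PySem.Chars.splitOn cs [':'] = spl cs := by
  unfold PySem.Chars.splitOn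
  rw [splitOn_go_eq (cs.length + 1) cs [] [] (Nat.le_succ _)]
  have hnil := spl_ne_nil cs
  cases h : spl cs with
  | nil => exact absurd h hnil
  | cons a l => simp [List.modifyHead]

theorem spl_no_colon {cs : List Char} (h : ':' ∉ cs) : spl cs = [cs] := by
  induction cs with
  | nil => simp [spl]
  | cons c t ih =>
    have hc : ¬ c = ':' := fun e => h (e ▸ List.mem_cons_self ..)
    have ht : ':' ∉ t := fun m => h (List.mem_cons_of_mem _ m)
    simp [spl, hc, ih ht, List.modifyHead]

theorem spl_append {a : List Char} (b : List Char) (h : ':' ∉ a) :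
    spl (a ++ ':' :: b) = a :: spl b := by
  induction a with
  | nil => simp [spl]
  | cons c t ih =>
    have hc : ¬ c = ':' := fun e => h (e ▸ List.mem_cons_self ..)
    have ht : ':' ∉ t := fun m => h (List.mem_cons_of_mem _ m)
    simp [spl, hc, ih ht, List.modifyHead]

theorem find_go_none {l : List Char} (h : ':' ∉ l) (k : Nat) :
    PySem.Chars.find.go [':'] l k = -1 := by
  induction l generalizing k with
  | nil => simp [PySem.Chars.find.go, List.isEmpty]
  | cons c t ih =>
    have hc : ¬ c = ':' := fun e => h (e ▸ List.mem_cons_self ..)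
    have ht : ':' ∉ t := fun m => h (List.mem_cons_of_mem _ m)
    conv_lhs => rw [PySem.Chars.find.go.eq_def]
    have hpre : List.isPrefixOf [':'] (c :: t) = false := by
      simp [List.isPrefixOf]; exact fun e => (hc (Eq.symm e)).elim
    simp only [hpre, Bool.false_eq_true, if_false]
    exact ih ht (k + 1)

theorem find_go_append {a : List Char} (b : List Char) (h : ':' ∉ a) (k : Nat) :
    PySem.Chars.find.go [':'] (a ++ ':' :: b) k = (k : Int) + a.length := by
  induction a generalizing k with
  | nil =>
    rw [PySem.Chars.find.go.eq_def]
    simp [List.isPrefixOf]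
  | cons c t ih =>
    have hc : ¬ c = ':' := fun e => h (e ▸ List.mem_cons_self ..)
    have ht : ':' ∉ t := fun m => h (List.mem_cons_of_mem _ m)
    conv_lhs => rw [PySem.Chars.find.go.eq_def]
    have hpre : List.isPrefixOf [':'] (c :: (t ++ ':' :: b)) = false := by
      simp [List.isPrefixOf]; exact fun e => (hc (Eq.symm e)).elim
    simp only [List.cons_append, hpre, Bool.false_eq_true, if_false]
    rw [ih ht (k + 1)]
    simp
    ring

theorem find_none {cs : List Char} (h : ':' ∉ cs) : PySem.Chars.find cs [':'] = -1 := by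
  unfold PySem.Chars.find; exact find_go_none h 0

theorem find_append {a : List Char} (b : List Char) (h : ':' ∉ a) :
    PySem.Chars.find (a ++ ':' :: b) [':'] = a.length := by
  unfold PySem.Chars.find
  rw [find_go_append b h 0]
  simp

theorem ex_split {cs : List Char} (h : ':' ∈ cs) :
    ∃ a b, ':' ∉ a ∧ cs = a ++ ':' :: b := by
  induction cs with
  | nil => simp at h
  | cons c t ih =>
    by_cases hc : c = ':'
    · exact ⟨[], t, by simp, by simp [hc]⟩
    · have ht : ':' ∈ t := by
        rcases List.mem_cons.mp h with h1 | h1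
        · exact absurd h1.symm hc
        · exact h1
      obtain ⟨a, b, ha, rfl⟩ := ih ht
      exact ⟨c :: a, b, by simp [ha]; exact fun e => hc (Eq.symm e), by simp⟩

-- String-level helper: findFrom at a Nat-cast start, phrased on toList
theorem findFrom_nat (s : String) (n : Nat) (hn : n ≤ s.toList.length) :
    PySem.Str.findFrom s ":" (n : Int) =
      if PySem.Chars.find (s.toList.drop n) [':'] = -1 then -1
      else (n : Int) + PySem.Chars.find (s.toList.drop n) [':'] := by
  rw [PySem.Str.findFrom_eq]
  have := PySem.Chars.findFrom_natCast s.toList ":".toList n hn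
  simpa using this

set_option maxHeartbeats 1000000 in
theorem parse_proxy_eq (line : String) : parse_proxy line = parse_proxy_alt line := by
  unfold parse_proxy parse_proxy_alt
  set s := PySem.Str.strip line with hs
  simp only [PySem.Str.startswith_eq, Bool.or_eq_true, decide_eq_true_iff]
  by_cases hg : s = "" ∨ PySem.Chars.startswith s.toList "#".toList = true
  · rw [if_pos hg, if_pos hg]
  · rw [if_neg hg, if_neg hg]
    -- parts on the A side
    have hsplit : PySem.Str.split? s ":" = some ((PySem.Chars.splitOn s.toList [':']).map String.ofList) := by
      have h1 := PySem.Str.split?_map s ":"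
      have h2 : PySem.Chars.split? s.toList ":".toList = some (PySem.Chars.splitOn s.toList [':']) := by
        simp [PySem.Chars.split?]
      rw [h2] at h1
      cases h3 : PySem.Str.split? s ":" with
      | none => rw [h3] at h1; simp at h1
      | some ps =>
        rw [h3] at h1
        simp only [Option.map_some, Option.some.injEq] at h1
        congr 1
        rw [← h1, List.map_map]
        have hid : (String.ofList ∘ String.toList) = id := by
          funext x; simp
        rw [hid, List.map_id]
    by_cases hc : ':' ∈ s.toList
    · obtain ⟨a, b, ha, hab⟩ := ex_split hc
      have hfind : PySem.Str.find s ":" = (a.length : Int) := by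
        rw [PySem.Str.find_eq]
        show PySem.Chars.find s.toList [':'] = _
        rw [hab, find_append b ha]
      rw [hfind, hsplit]
      simp only [Option.getD_some]
      rw [if_neg (by omega : ¬ ((a.length : Int) < 0))]
      have hlen : a.length + 1 ≤ s.toList.length := by
        rw [hab]; simp only [List.length_append, List.length_cons]; omega
      have hdrop1 : s.toList.drop (a.length + 1) = b := by
        rw [hab]
        have : a ++ ':' :: b = (a ++ [':']) ++ b := by simp
        rw [this]
        exact List.drop_left' (by simp)
      have hcast1 : (a.length : Int) + 1 = ((a.length + 1 : Nat) : Int) := by push_cast; ring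
      by_cases hcb : ':' ∈ b
      · -- at least three segments
        obtain ⟨c, d, hcnc, hcd⟩ := ex_split hcb
        have hj : PySem.Str.findFrom s ":" ((a.length : Int) + 1) =
            ((a.length + 1 + c.length : Nat) : Int) := by
          rw [hcast1, findFrom_nat s (a.length + 1) hlen, hdrop1, hcd, find_append d hcnc]
          rw [if_neg (by omega)]
          push_cast; ring
        have hjpos : ¬ ((a.length + 1 + c.length : Nat) : Int) < 0 := by omega
        have hlen2 : a.length + 1 + c.length + 1 ≤ s.toList.length := by
          rw [hab, hcd]; simp only [List.length_append, List.length_cons]; omega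
        have hdrop2 : s.toList.drop (a.length + 1 + c.length + 1) = d := by
          rw [hab, hcd]
          have : a ++ ':' :: (c ++ ':' :: d) = (a ++ ':' :: c ++ [':']) ++ d := by simp
          rw [this]
          exact List.drop_left' (by simp only [List.length_append, List.length_cons, List.length_nil]; omega)
        have hcast2 : ((a.length + 1 + c.length : Nat) : Int) + 1 = ((a.length + 1 + c.length + 1 : Nat) : Int) := by push_cast; ring
        rw [hj]
        rw [if_neg hjpos]
        by_cases hcd2 : ':' ∈ d
        · -- at least four segments
          obtain ⟨e, f, hene, hef⟩ := ex_split hcd2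
          have hk : PySem.Str.findFrom s ":" (((a.length + 1 + c.length : Nat) : Int) + 1) =
              ((a.length + 1 + c.length + 1 + e.length : Nat) : Int) := by
            rw [hcast2, findFrom_nat s _ hlen2, hdrop2, hef, find_append f hene]
            rw [if_neg (by omega)]
            push_cast; ring
          have hkpos : ¬ ((a.length + 1 + c.length + 1 + e.length : Nat) : Int) < 0 := by omega
          have hlen3 : a.length + 1 + c.length + 1 + e.length + 1 ≤ s.toList.length := by
            rw [hab, hcd, hef]; simp only [List.length_append, List.length_cons]; omega
          have hdrop3 : s.toList.drop (a.length + 1 + c.length + 1 + e.length + 1) = f := by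
            rw [hab, hcd, hef]
            have : a ++ ':' :: (c ++ ':' :: (e ++ ':' :: f)) =
                (a ++ ':' :: c ++ ':' :: e ++ [':']) ++ f := by simp
            rw [this]
            exact List.drop_left' (by simp only [List.length_append, List.length_cons, List.length_nil]; omega)
          have hcast3 : ((a.length + 1 + c.length + 1 + e.length : Nat) : Int) + 1 =
              ((a.length + 1 + c.length + 1 + e.length + 1 : Nat) : Int) := by push_cast; ring
          rw [hk]
          by_cases hcf : ':' ∈ f
          · -- five or more segments: both sides none
            have hlast : 0 ≤ PySem.Str.findFrom s ":" (((a.length + 1 + c.length + 1 + e.length : Nat) : Int) + 1) := by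
              obtain ⟨g, h', hgn, hgf⟩ := ex_split hcf
              rw [hcast3, findFrom_nat s _ hlen3, hdrop3, hgf, find_append h' hgn]
              rw [if_neg (by omega)]
              omega
            have hspl : PySem.Chars.splitOn s.toList [':'] = a :: c :: e :: spl f := by
              rw [splitOn_eq_spl, hab, spl_append _ ha, hcd, spl_append _ hcnc, hef, spl_append _ hene]
            have hf2 : 2 ≤ (spl f).length := by
              obtain ⟨g, h', hgn, hgf⟩ := ex_split hcf
              rw [hgf, spl_append _ hgn]
              have hne := spl_ne_nil h'
              cases h : spl h' with
              | nil => exact absurd h hne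
              | cons x l => simp
            rw [hspl]
            rw [if_pos (Or.inr hlast)]
            simp only [List.map_cons, List.length_cons, List.length_map]
            rw [if_neg (by omega), if_neg (by omega)]
          · -- exactly four segments
            have hlast : ¬ 0 ≤ PySem.Str.findFrom s ":" (((a.length + 1 + c.length + 1 + e.length : Nat) : Int) + 1) := by
              rw [hcast3, findFrom_nat s _ hlen3, hdrop3, find_none hcf]
              simp
            have hspl : PySem.Chars.splitOn s.toList [':'] = [a, c, e, f] := by
              rw [splitOn_eq_spl, hab, spl_append _ ha, hcd, spl_append _ hcnc, hef,
                spl_append _ hene, spl_no_colon hcf]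
            have hsl1 : PySem.Str.slice s (some (((a.length + 1 + c.length : Nat) : Int) + 1))
                (some ((a.length + 1 + c.length + 1 + e.length : Nat) : Int)) = String.ofList e := by
              apply String.toList_inj.mp
              rw [PySem.Str.toList_slice]
              simp only [PySem.Chars.slice_eq_listSlice]
              rw [hcast2, PySem.List.slice_natCast, hdrop2, hef]
              have he : a.length + 1 + c.length + 1 + e.length - (a.length + 1 + c.length + 1) = e.length := by omega
              rw [he, String.toList_ofList]
              exact List.take_left' rfl
            have hsl2 : PySem.Str.slice s (some (((a.length + 1 + c.length + 1 + e.length : Nat) : Int) + 1)) none = String.ofList f := by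
              apply String.toList_inj.mp
              rw [PySem.Str.toList_slice]
              simp only [PySem.Chars.slice_eq_listSlice]
              rw [hcast3, PySem.List.slice_from _ (by omega)]
              rw [String.toList_ofList]
              simpa using hdrop3
            have hsl3 : PySem.Str.slice s none (some (a.length : Int)) = String.ofList a := by
              apply String.toList_inj.mp
              rw [PySem.Str.toList_slice]
              simp only [PySem.Chars.slice_eq_listSlice]
              rw [PySem.List.slice_to _ (by omega), String.toList_ofList, hab]
              simpa using List.take_left' rfl
            have hsl4 : PySem.Str.slice s (some ((a.length : Int) + 1))
                (some ((a.length + 1 + c.length : Nat) : Int)) = String.ofList c := by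
              apply String.toList_inj.mp
              rw [PySem.Str.toList_slice]
              simp only [PySem.Chars.slice_eq_listSlice]
              rw [hcast1, PySem.List.slice_natCast, hdrop1, hcd]
              have hcl : a.length + 1 + c.length - (a.length + 1) = c.length := by omega
              rw [hcl, String.toList_ofList]
              exact List.take_left' rfl
            have hBcond : ¬ (((a.length + 1 + c.length + 1 + e.length : Nat) : Int) < 0 ∨
                0 ≤ PySem.Str.findFrom s ":" (((a.length + 1 + c.length + 1 + e.length : Nat) : Int) + 1)) := by
              rintro (h | h)
              · omega
              · exact hlast h
            rw [if_neg hBcond]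
            have hA2 : ¬ (List.map String.ofList (PySem.Chars.splitOn s.toList [':'])).length = 2 := by
              rw [hspl]; simp
            have hA4 : (List.map String.ofList (PySem.Chars.splitOn s.toList [':'])).length = 4 := by
              rw [hspl]; simp
            rw [if_neg hA2, if_pos hA4, hspl]
            rw [hsl1, hsl2, hsl3, hsl4]
            have hst : ∀ u : List Char, PySem.Str.strip (String.ofList u) = String.ofList (PySem.Chars.strip u) := by
              intro u
              apply String.toList_inj.mp
              rw [PySem.Str.toList_strip]
              simp
            simp [hst]
        · -- exactly three segments: both sides none
          have hk : PySem.Str.findFrom s ":" (((a.length + 1 + c.length : Nat) : Int) + 1) = -1 := by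
            rw [hcast2, findFrom_nat s _ hlen2, hdrop2, find_none hcd2]
            simp
          have hspl : PySem.Chars.splitOn s.toList [':'] = [a, c, d] := by
            rw [splitOn_eq_spl, hab, spl_append _ ha, hcd, spl_append _ hcnc, spl_no_colon hcd2]
          rw [hk]
          rw [hspl]
          simp only [List.map_cons, List.map_nil, List.length_cons, List.length_nil]
          rw [if_neg (by omega), if_neg (by omega), if_pos (by norm_num)]
      · -- exactly two segments
        have hj : PySem.Str.findFrom s ":" ((a.length : Int) + 1) = -1 := by
          rw [hcast1, findFrom_nat s _ hlen, hdrop1, find_none hcb]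
          simp
        have hspl : PySem.Chars.splitOn s.toList [':'] = [a, b] := by
          rw [splitOn_eq_spl, hab, spl_append _ ha, spl_no_colon hcb]
        have hsl1 : PySem.Str.slice s none (some (a.length : Int)) = String.ofList a := by
          apply String.toList_inj.mp
          rw [PySem.Str.toList_slice]
          simp only [PySem.Chars.slice_eq_listSlice]
          rw [PySem.List.slice_to _ (by omega)]
          rw [hab]
          simpa using List.take_left' rfl
        have hsl2 : PySem.Str.slice s (some ((a.length : Int) + 1)) none = String.ofList b := by
          apply String.toList_inj.mp
          rw [PySem.Str.toList_slice]
          simp only [PySem.Chars.slice_eq_listSlice]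
          rw [hcast1, PySem.List.slice_from _ (by omega)]
          simpa using hdrop1
        have hA2 : (List.map String.ofList (PySem.Chars.splitOn s.toList [':'])).length = 2 := by
          rw [hspl]; simp
        rw [if_pos hA2, hspl, hj]
        rw [if_pos (show (-1:Int) < 0 by norm_num)]
        rw [hsl1, hsl2]
        have hst : ∀ u : List Char, PySem.Str.strip (String.ofList u) = String.ofList (PySem.Chars.strip u) := by
          intro u
          apply String.toList_inj.mp
          rw [PySem.Str.toList_strip]
          simp
        simp [hst]
    · -- no colon at all: one segment, both none
      have hfind : PySem.Str.find s ":" = -1 := by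
        rw [PySem.Str.find_eq]
        exact find_none hc
      have hspl : PySem.Chars.splitOn s.toList [':'] = [s.toList] := by
        rw [splitOn_eq_spl, spl_no_colon hc]
      have hA2 : ¬ ((PySem.Str.split? s ":").getD []).length = 2 := by
        rw [hsplit]; simp [hspl]
      have hA4 : ¬ ((PySem.Str.split? s ":").getD []).length = 4 := by
        rw [hsplit]; simp [hspl]
      rw [if_neg hA2, if_neg hA4, hfind, if_pos (show (-1:Int) < 0 by norm_num)]

-- ===== VERDICT (by name: the statement is the Claim_ definition above) =====
theorem parse_proxy_spec : Claim_equal_parse_proxy := by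
  intro line _
  unfold Spec_parse_proxy
  exact parse_proxy_eq line
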